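-- pv_equiv track=rewrite | github.com/Saumya-Chavan/StudyBot | agents/flashcard_agent.py | generate_flashcards
-- ===== SOURCE A (Python) =====
-- def generate_flashcards(keywords, text, lang="en"):
--     """
--     Returns a list of flashcard dicts:
--     [{"term":..., "meaning":..., "example":..., "difficulty":...}, ...]
--     """
--     flashcards = []
--     if not keywords:
--         return flashcards
--
--     sentences = [s.strip() for s in str(text).split('.') if s.strip()]
--
--     for key in keywords:
--         example = ""
--         key_str = str(key)
--         key_lower = key_str.lower()
--         for s in sentences:
--             if key_lower in s.lower():
--                 example = s.strip()
--                 break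
--
--         flashcards.append({
--             "term": key_str,
--             "meaning": f"Important concept related to {key_str}. Review this concept.",
--             "example": example or f"No example sentence found for {key_str}.",
--             "difficulty": "medium"
--         })
--
--     return flashcards
-- ===== SOURCE B (Python) =====
-- def generate_flashcards(keywords, text, lang="en"):
--     """
--     Single pass over the sentences: keep a table (lowercased keyword -> first
--     matching sentence) and the list of still-unmatched lowercased keywords,
--     then build the flashcards from the original keywords list via the table.
--     """
--     sentences = [s.strip() for s in str(text).split('.') if s.strip()]
--     remaining = list(dict.fromkeys(str(k).lower() for k in keywords))
--     table = {}
--     for s in sentences: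
--         slow = s.lower()
--         for kl in remaining:
--             if kl in slow:
--                 table[kl] = s
--         remaining = [kl for kl in remaining if kl not in slow]
--
--     def card(key):
--         k = str(key)
--         example = table.get(k.lower(), "")
--         return {
--             "term": k,
--             "meaning": f"Important concept related to {k}. Review this concept.",
--             "example": example or f"No example sentence found for {k}.",
--             "difficulty": "medium",
--         }
--
--     return [card(key) for key in keywords]
-- ===== Notes on version B (the rewrite author's own statement) =====
-- stated objective: alternative
-- what changed: Inverted the loop nest: one pass over the sentences maintaining a first-match table keyed by lowercased keyword plus the shrinking list of unmatched keywords, then the cards are built from the keywords list via table lookup (instead of rescanning all sentences per keyword with a break).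
import Mathlib
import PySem

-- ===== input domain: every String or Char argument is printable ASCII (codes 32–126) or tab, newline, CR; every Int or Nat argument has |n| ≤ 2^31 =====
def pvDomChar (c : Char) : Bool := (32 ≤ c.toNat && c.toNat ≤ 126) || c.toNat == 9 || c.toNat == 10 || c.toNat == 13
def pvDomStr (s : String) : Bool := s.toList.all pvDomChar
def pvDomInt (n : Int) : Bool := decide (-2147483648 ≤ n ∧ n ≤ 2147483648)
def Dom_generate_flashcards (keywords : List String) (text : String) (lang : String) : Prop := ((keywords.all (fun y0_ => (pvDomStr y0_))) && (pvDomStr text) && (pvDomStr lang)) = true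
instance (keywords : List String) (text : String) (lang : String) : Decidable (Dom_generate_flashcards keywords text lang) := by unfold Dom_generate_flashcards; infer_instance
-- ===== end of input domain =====

-- B inverts A's loop nest: one pass over the sentences with a first-match table
-- (lowercased keyword -> sentence) instead of a sentence scan per keyword (objective: alternative).

-- shared helper: the line 'sentences = [s.strip() for s in str(text).split('.') if s.strip()]'
-- appears verbatim in both Pythons
def pvSentences (text : String) : List String :=
  (((PySem.Str.split? text ".").getD []).filter
      (fun s => PySem.Str.strip s ≠ "")).map PySem.Str.strip

-- shared helper: the flashcard dict literal, identical in both Pythons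
-- ('example or fallback' — Python's falsy test on a string is emptiness)
def pvCard (key ex : String) : List (String × String) :=
  [("term", key),
   ("meaning", "Important concept related to " ++ key ++ ". Review this concept."),
   ("example", if ex = "" then "No example sentence found for " ++ key ++ "." else ex),
   ("difficulty", "medium")]

-- ===== PORT A =====
-- A's inner 'for s in sentences: … break' over a fixed key_lower
def pvFirstExample (kl : String) : List String → String
  | [] => ""
  | s :: rest =>
      if PySem.Str.isIn kl (PySem.Str.lower s) then PySem.Str.strip s
      else pvFirstExample kl rest

def generate_flashcards (keywords : List String) (text : String) (lang : String) :
    List (List (String × String)) :=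
  if keywords = [] then []
  else
    let sentences := pvSentences text
    keywords.foldl
      (fun flashcards key =>
        flashcards ++ [pvCard key (pvFirstExample (PySem.Str.lower key) sentences)])
      []

-- ===== PORT B =====
-- one sentence step: record every still-unmatched keyword contained in it, drop the matched ones
def pvStepB (st : PySem.Dict String String × List String) (s : String) :
    PySem.Dict String String × List String :=
  let slow := PySem.Str.lower s
  (st.2.foldl (fun t kl => if PySem.Str.isIn kl slow then t.insert kl s else t) st.1,
   st.2.filter (fun kl => !(PySem.Str.isIn kl slow)))

def generate_flashcards_alt (keywords : List String) (text : String) (lang : String) :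
    List (List (String × String)) :=
  let sentences := pvSentences text
  let remaining := PySem.List.dedup (keywords.map PySem.Str.lower)
  let table := (sentences.foldl pvStepB (PySem.Dict.empty, remaining)).1
  keywords.map (fun key => pvCard key (table.getD (PySem.Str.lower key) ""))

-- ===== PRECONDITION & SPEC =====
def Spec_generate_flashcards (keywords : List String) (text : String) (lang : String) (out : List (List (String × String))) : Prop := out = generate_flashcards_alt keywords text lang
instance (keywords : List String) (text : String) (lang : String) (out : List (List (String × String))) : Decidable (Spec_generate_flashcards keywords text lang out) := by unfold Spec_generate_flashcards; infer_instance

-- ===== CLAIM (what is proved, stated in full; the proofs are below) =====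
def Claim_equal_generate_flashcards : Prop := ∀ (keywords : List String) (text : String) (lang : String), Dom_generate_flashcards keywords text lang → Spec_generate_flashcards keywords text lang (generate_flashcards keywords text lang)

-- ===== LEMMAS AND PROOFS =====

-- Python's strip is idempotent, so every member of pvSentences is its own strip
theorem pv_chars_strip_strip (l : List Char) :
    PySem.Chars.strip (PySem.Chars.strip l) = PySem.Chars.strip l := by
  have hrd : ∀ m : List Char, PySem.Chars.rstrip m = m.rdropWhile PySem.Chars.isspace := by
    intro m; simp [PySem.Chars.rstrip, List.rdropWhile]
  have hls : ∀ m : List Char, PySem.Chars.lstrip m = m.dropWhile PySem.Chars.isspace :=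
    fun m => rfl
  simp only [PySem.Chars.strip, hrd, hls]
  have h1 : List.dropWhile PySem.Chars.isspace
      (List.rdropWhile PySem.Chars.isspace (List.dropWhile PySem.Chars.isspace l)) =
      List.rdropWhile PySem.Chars.isspace (List.dropWhile PySem.Chars.isspace l) := by
    rw [List.dropWhile_eq_self_iff]
    intro hl
    have hpre : List.rdropWhile PySem.Chars.isspace (List.dropWhile PySem.Chars.isspace l)
        <+: List.dropWhile PySem.Chars.isspace l := List.rdropWhile_prefix _ _
    rw [List.IsPrefix.getElem hpre hl]
    exact List.dropWhile_eq_self_iff.mp (List.dropWhile_idempotent _ _)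
      (lt_of_lt_of_le hl hpre.length_le)
  rw [h1, List.rdropWhile_idempotent]

theorem pv_strip_strip (s : String) :
    PySem.Str.strip (PySem.Str.strip s) = PySem.Str.strip s := by
  apply String.toList_inj.mp
  rw [PySem.Str.toList_strip, PySem.Str.toList_strip, pv_chars_strip_strip]

theorem pv_strip_mem_sentences {text : String} {s : String} (h : s ∈ pvSentences text) :
    PySem.Str.strip s = s := by
  rcases List.mem_map.mp h with ⟨t, _, rfl⟩
  exact pv_strip_strip t

-- A's inner loop is find?-then-strip
theorem pvFirstExample_eq_find? (kl : String) (ss : List String) :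
    pvFirstExample kl ss =
      match ss.find? (fun s => PySem.Str.isIn kl (PySem.Str.lower s)) with
      | some s => PySem.Str.strip s
      | none => "" := by
  induction ss with
  | nil => rfl
  | cons s rest ih =>
      simp only [pvFirstExample, List.find?, PySem.Str.isIn_eq] at *
      by_cases h : PySem.Chars.isIn kl.toList (PySem.Chars.lower s.toList) <;> simp [h, ih]

-- B's inner fold over the remaining keywords, as seen by get?
theorem pv_inner_get? (slow : String) (v : String) (rem : List String)
    (tbl : PySem.Dict String String) (k : String) :
    (rem.foldl (fun t kl => if PySem.Str.isIn kl slow then t.insert kl v else t) tbl).get? k =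
      if k ∈ rem ∧ PySem.Str.isIn k slow then some v else tbl.get? k := by
  induction rem generalizing tbl with
  | nil => simp
  | cons a rest ih =>
      simp only [List.foldl_cons]
      rw [ih]
      by_cases hr : k ∈ rest ∧ PySem.Str.isIn k slow = true
      · rw [if_pos hr, if_pos ⟨List.mem_cons_of_mem _ hr.1, hr.2⟩]
      · rw [if_neg hr]
        by_cases ha : PySem.Str.isIn a slow = true
        · rw [if_pos ha]
          by_cases hka : k = a
          · subst hka
            rw [PySem.Dict.get?_insert_self, if_pos ⟨List.mem_cons_self, ha⟩]
          · rw [PySem.Dict.get?_insert, if_neg hka, if_neg]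
            rintro ⟨hm, hin⟩
            rcases List.mem_cons.mp hm with rfl | hm'
            · exact hka rfl
            · exact hr ⟨hm', hin⟩
        · rw [if_neg ha, if_neg]
          rintro ⟨hm, hin⟩
          rcases List.mem_cons.mp hm with rfl | hm'
          · exact ha hin
          · exact hr ⟨hm', hin⟩

-- B's outer fold over the sentences, as seen by get?
theorem pv_outer_get? (ss : List String) (tbl : PySem.Dict String String)
    (rem : List String) (k : String) :
    ((ss.foldl pvStepB (tbl, rem)).1).get? k =
      if k ∈ rem then
        match ss.find? (fun s => PySem.Str.isIn k (PySem.Str.lower s)) with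
        | some s => some s
        | none => tbl.get? k
      else tbl.get? k := by
  induction ss generalizing tbl rem with
  | nil => simp [List.find?]
  | cons s rest ih =>
      simp only [List.foldl_cons, pvStepB]
      rw [ih, pv_inner_get? (PySem.Str.lower s) s rem tbl k]
      cases hin : PySem.Str.isIn k (PySem.Str.lower s) with
      | true =>
          have hfind : List.find? (fun t => PySem.Str.isIn k (PySem.Str.lower t)) (s :: rest)
              = some s := List.find?_cons_of_pos hin
          have hin' : PySem.Chars.isIn k.toList (PySem.Chars.lower s.toList) = true := by
            rw [← PySem.Str.toList_lower, ← PySem.Str.isIn_eq]; exact hin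
          have hk' : k ∉ rem.filter (fun kl => !(PySem.Str.isIn kl (PySem.Str.lower s))) := by
            simp [List.mem_filter, hin']
          rw [if_neg hk', hfind]
          by_cases hk : k ∈ rem <;> simp [hk]
      | false =>
          have hfind : List.find? (fun t => PySem.Str.isIn k (PySem.Str.lower t)) (s :: rest)
              = List.find? (fun t => PySem.Str.isIn k (PySem.Str.lower t)) rest :=
            List.find?_cons_of_neg (fun h => by rw [hin] at h; exact Bool.noConfusion h)
          have hin' : PySem.Chars.isIn k.toList (PySem.Chars.lower s.toList) = false := by
            rw [← PySem.Str.toList_lower, ← PySem.Str.isIn_eq]; exact hin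
          rw [hfind]
          by_cases hk : k ∈ rem
          · have hk' : k ∈ rem.filter (fun kl => !(PySem.Str.isIn kl (PySem.Str.lower s))) :=
              List.mem_filter.mpr ⟨hk, by
                show (!(PySem.Str.isIn k (PySem.Str.lower s))) = true
                rw [hin]; rfl⟩
            rw [if_pos hk', if_pos hk]
            cases List.find? (fun t => PySem.Str.isIn k (PySem.Str.lower t)) rest <;> simp
          · have hk' : k ∉ rem.filter (fun kl => !(PySem.Str.isIn kl (PySem.Str.lower s))) :=
              fun h => hk (List.mem_filter.mp h).1
            rw [if_neg hk', if_neg hk]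
            simp [hk]

-- per-keyword agreement
theorem pv_example_eq (keywords : List String) (text : String) (key : String)
    (hmem : key ∈ keywords) :
    pvFirstExample (PySem.Str.lower key) (pvSentences text) =
      ((pvSentences text).foldl pvStepB
        (PySem.Dict.empty, PySem.List.dedup (keywords.map PySem.Str.lower))).1.getD
        (PySem.Str.lower key) "" := by
  have hget := pv_outer_get? (pvSentences text) PySem.Dict.empty
      (PySem.List.dedup (keywords.map PySem.Str.lower)) (PySem.Str.lower key)
  have hmem' : PySem.Str.lower key ∈ PySem.List.dedup (keywords.map PySem.Str.lower) := by
    rw [PySem.List.mem_dedup]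
    exact List.mem_map.mpr ⟨key, hmem, rfl⟩
  rw [if_pos hmem'] at hget
  rw [pvFirstExample_eq_find?, PySem.Dict.getD_eq_get?_getD, hget]
  cases hfind : (pvSentences text).find? (fun s => PySem.Str.isIn (PySem.Str.lower key) (PySem.Str.lower s)) with
  | none => simp
  | some s =>
      have hs : s ∈ pvSentences text := List.mem_of_find?_eq_some hfind
      simp [pv_strip_mem_sentences hs]

theorem pv_foldl_append {α β : Type} (l : List α) (f : α → β) (a : List β) :
    l.foldl (fun acc x => acc ++ [f x]) a = a ++ l.map f := by
  induction l generalizing a with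
  | nil => simp
  | cons x rest ih => simp [ih]

-- ===== VERDICT (by name: the statement is the Claim_ definition above) =====
theorem generate_flashcards_spec : Claim_equal_generate_flashcards := by
  intro keywords text lang _
  unfold Spec_generate_flashcards generate_flashcards generate_flashcards_alt
  by_cases hk : keywords = []
  · subst hk; simp
  · rw [if_neg hk, pv_foldl_append, List.nil_append]
    apply List.map_congr_left
    intro key hmem
    rw [pv_example_eq keywords text key hmem]
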